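-- pv_equiv track=rewrite | github.com/christinehhhh/runnable-to-core | backend/main_scheduler.py | topology
-- ===== SOURCE A (Python) =====
-- from typing import Dict, List, Optional, Tuple
--
-- def topology(runnables: Dict[str, Dict]) -> Tuple[Dict[str, List[str]], Dict[str, List[str]]]:
--     successors: Dict[str, List[str]] = {name: [] for name in runnables}
--     predecessors: Dict[str, List[str]] = {name: [] for name in runnables}
--     for name, props in runnables.items():
--         for dep in props.get("deps", []) or []:
--             if dep in runnables:
--                 successors[dep].append(name)
--                 predecessors[name].append(dep)
--     return successors, predecessors
-- ===== SOURCE B (Python) =====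
-- def topology(runnables):
--     predecessors = {
--         name: [d for d in (props.get("deps", []) or []) if d in runnables]
--         for name, props in runnables.items()
--     }
--     successors = {
--         name: [m for m, ds in predecessors.items() for d in ds if d == name]
--         for name in runnables
--     }
--     return successors, predecessors
-- ===== Notes on version B (the rewrite author's own statement) =====
-- stated objective: alternative
-- what changed: A scatters: one loop over all edges appending into both adjacency dicts; B first defines predecessors as a filtering comprehension and then computes each successors[name] directly by a gather scan over the whole predecessors map (a per-node comprehension), with no successor accumulator or append at all.
import Mathlib
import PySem

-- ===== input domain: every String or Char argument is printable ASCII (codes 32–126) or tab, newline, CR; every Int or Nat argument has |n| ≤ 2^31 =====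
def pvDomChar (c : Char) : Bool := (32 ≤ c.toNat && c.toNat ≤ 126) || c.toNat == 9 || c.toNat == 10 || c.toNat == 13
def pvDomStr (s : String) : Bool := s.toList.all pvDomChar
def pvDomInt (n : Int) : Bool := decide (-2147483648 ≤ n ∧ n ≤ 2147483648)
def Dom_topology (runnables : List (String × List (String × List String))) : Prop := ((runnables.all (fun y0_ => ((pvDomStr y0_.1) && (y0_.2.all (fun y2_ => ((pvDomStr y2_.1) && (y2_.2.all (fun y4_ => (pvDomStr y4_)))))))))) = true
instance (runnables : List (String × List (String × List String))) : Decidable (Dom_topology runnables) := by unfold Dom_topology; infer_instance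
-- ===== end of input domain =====

-- B builds predecessors as a filtering comprehension and then computes each successors[name]
-- directly by a gather scan over the predecessors map — no successor accumulator/appends at all
-- (objective: alternative; B does more scanning, not faster).

-- ===== PORT A =====
-- `props.get("deps", []) or []`: `or []` maps a falsy (empty) list to [] — over list values this
-- is ported exactly as an emptiness test.
def pyOrEmpty (l : List String) : List String := if l.isEmpty then [] else l

def topology (runnables : List (String × List (String × List String))) :
    (List (String × List String)) × (List (String × List String)) :=
  let R := PySem.Dict.ofList runnables
  let successors0 : PySem.Dict String (List String) :=
    R.keys.foldl (fun d name => d.insert name []) PySem.Dict.empty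
  let predecessors0 : PySem.Dict String (List String) :=
    R.keys.foldl (fun d name => d.insert name []) PySem.Dict.empty
  -- successors[dep].append(name) / predecessors[name].append(dep): both keys are guaranteed
  -- present by the `dep in runnables` guard resp. the initialisation, so `.modify _ []` is exact.
  let sp :=
    R.items.foldl
      (fun (sp : PySem.Dict String (List String) × PySem.Dict String (List String)) p =>
        (pyOrEmpty ((PySem.Dict.ofList p.2).getD "deps" [])).foldl
          (fun sp dep =>
            if R.contains dep then
              (sp.1.modify dep [] (· ++ [p.1]), sp.2.modify p.1 [] (· ++ [dep]))
            else sp)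
          sp)
      (successors0, predecessors0)
  (sp.1.items, sp.2.items)

-- ===== PORT B =====
def topology_alt (runnables : List (String × List (String × List String))) :
    (List (String × List String)) × (List (String × List String)) :=
  let R := PySem.Dict.ofList runnables
  let predecessors : PySem.Dict String (List String) :=
    R.items.foldl
      (fun d p =>
        d.insert p.1
          ((pyOrEmpty ((PySem.Dict.ofList p.2).getD "deps" [])).filter (fun dep => R.contains dep)))
      PySem.Dict.empty
  -- `[m for m, ds in predecessors.items() for d in ds if d == name]`
  let successors : PySem.Dict String (List String) :=
    R.keys.foldl
      (fun d name =>
        d.insert name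
          (predecessors.items.flatMap
            (fun q => (q.2.filter (fun dep => dep == name)).map (fun _ => q.1))))
      PySem.Dict.empty
  (successors.items, predecessors.items)

-- ===== PRECONDITION & SPEC =====
def Spec_topology (runnables : List (String × List (String × List String))) (out : (List (String × List String)) × (List (String × List String))) : Prop := out = topology_alt runnables
instance (runnables : List (String × List (String × List String))) (out : (List (String × List String)) × (List (String × List String))) : Decidable (Spec_topology runnables out) := by unfold Spec_topology; infer_instance

-- ===== CLAIM (what is proved, stated in full; the proofs are below) =====
def Claim_equal_topology : Prop := ∀ (runnables : List (String × List (String × List String))), Dom_topology runnables → Spec_topology runnables (topology runnables)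

-- ===== LEMMAS AND PROOFS =====

-- the filtered dependency list of one runnable
def pvDeps (R : PySem.Dict String (List (String × List String)))
    (p : String × List (String × List String)) : List String :=
  ((PySem.Dict.ofList p.2).getD "deps" []).filter (fun dep => R.contains dep)

theorem pvOrEmpty_filter (l : List String) (c : String → Bool) :
    (pyOrEmpty l).filter c = l.filter c := by
  cases l <;> simp [pyOrEmpty]

-- A's paired inner loop splits into two independent folds
theorem pv_pair_split (k : String) (c : String → Bool) :
    ∀ (l : List String) (s p : PySem.Dict String (List String)),
      l.foldl
        (fun sp dep =>
          if c dep then (sp.1.modify dep [] (· ++ [k]), sp.2.modify k [] (· ++ [dep])) else sp)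
        (s, p)
      = (l.foldl (fun s dep => if c dep then s.modify dep [] (· ++ [k]) else s) s,
         l.foldl (fun p dep => if c dep then p.modify k [] (· ++ [dep]) else p) p)
  | [], _, _ => rfl
  | dep :: l, s, p => by
      by_cases h : c dep <;>
        simp only [List.foldl_cons, h, if_true] <;>
        exact pv_pair_split k c l _ _

-- A's outer loop over the pair of dicts splits into two independent outer folds
theorem pv_split_pairs (R : PySem.Dict String (List (String × List String))) :
    ∀ (l : List (String × List (String × List String)))
      (s p : PySem.Dict String (List String)),
      l.foldl
        (fun sp q =>
          (pyOrEmpty ((PySem.Dict.ofList q.2).getD "deps" [])).foldl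
            (fun sp dep =>
              if R.contains dep then
                (sp.1.modify dep [] (· ++ [q.1]), sp.2.modify q.1 [] (· ++ [dep]))
              else sp)
            sp)
        (s, p)
      = (l.foldl
          (fun s q =>
            (pyOrEmpty ((PySem.Dict.ofList q.2).getD "deps" [])).foldl
              (fun s dep => if R.contains dep then s.modify dep [] (· ++ [q.1]) else s) s) s,
         l.foldl
          (fun d q =>
            (pyOrEmpty ((PySem.Dict.ofList q.2).getD "deps" [])).foldl
              (fun d dep => if R.contains dep then d.modify q.1 [] (· ++ [dep]) else d) d) p)
  | [], _, _ => rfl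
  | q :: l, s, p => by
      rw [List.foldl_cons, List.foldl_cons, List.foldl_cons,
        pv_pair_split q.1 (fun dep => R.contains dep)]
      exact pv_split_pairs R l _ _

-- the guarded fold over the raw deps list is the plain fold over the filtered deps list
theorem pv_stepS (R : PySem.Dict String (List (String × List String)))
    (q : String × List (String × List String)) (s : PySem.Dict String (List String)) :
    (pyOrEmpty ((PySem.Dict.ofList q.2).getD "deps" [])).foldl
        (fun s dep => if R.contains dep then s.modify dep [] (· ++ [q.1]) else s) s
      = (pvDeps R q).foldl (fun s dep => s.modify dep [] (· ++ [q.1])) s := by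
  rw [pvDeps, ← pvOrEmpty_filter, List.foldl_filter]

theorem pv_stepP (R : PySem.Dict String (List (String × List String)))
    (q : String × List (String × List String)) (d : PySem.Dict String (List String)) :
    (pyOrEmpty ((PySem.Dict.ofList q.2).getD "deps" [])).foldl
        (fun d dep => if R.contains dep then d.modify q.1 [] (· ++ [dep]) else d) d
      = (pvDeps R q).foldl (fun d dep => d.modify q.1 [] (· ++ [dep])) d := by
  rw [pvDeps, ← pvOrEmpty_filter, List.foldl_filter]

-- inserting the value a key already holds (with unique keys) is the identity
theorem pv_insert_self (d : PySem.Dict String (List String)) (k : String) (a : List String)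
    (hnd : d.keys.Nodup) (h : d.get? k = some a) : d.insert k a = d := by
  have hmem : (k, a) ∈ d.items := PySem.Dict.mem_items_of_get?_eq_some d h
  have hc : d.contains k = true := by
    simp only [PySem.Dict.contains, List.any_eq_true]
    exact ⟨(k, a), hmem, by simp⟩
  apply PySem.Dict.ext
  rw [PySem.Dict.items_insert_of_contains d a hc]
  have : ∀ p ∈ d.items, (if (p.1 == k) = true then (k, a) else p) = id p := by
    intro p hp
    by_cases hk : p.1 = k
    · have : p = (k, a) :=
        List.inj_on_of_nodup_map hnd hp hmem (by simpa using hk)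
      simp [this]
    · simp [hk]
  rw [List.map_congr_left this, List.map_id]

-- repeated append-modify at one key collapses to a single insert
theorem pv_inner (k : String) :
    ∀ (l : List String) (d : PySem.Dict String (List String)) (a : List String),
      d.keys.Nodup → d.get? k = some a →
      l.foldl (fun d dep => d.modify k [] (· ++ [dep])) d = d.insert k (a ++ l)
  | [], d, a, hnd, h => by simpa using (pv_insert_self d k a hnd h).symm
  | dep :: l, d, a, hnd, h => by
      have hstep : d.modify k [] (· ++ [dep]) = d.insert k (a ++ [dep]) := by
        simp [PySem.Dict.modify, PySem.Dict.getD_of_get?_eq_some d [] h]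
      rw [List.foldl_cons, hstep,
        pv_inner k l (d.insert k (a ++ [dep])) (a ++ [dep])
          (PySem.Dict.nodup_keys_insert d k (a ++ [dep]) hnd)
          (PySem.Dict.get?_insert_self d k (a ++ [dep])),
        PySem.Dict.insert_insert_self]
      simp

-- A's predecessor loop over []-initialised keys = a loop of plain inserts
theorem pv_fill :
    ∀ (its : List (String × List String)) (d : PySem.Dict String (List String)),
      d.keys.Nodup → (its.map Prod.fst).Nodup → (∀ q ∈ its, d.get? q.1 = some []) →
      its.foldl (fun d q => q.2.foldl (fun d dep => d.modify q.1 [] (· ++ [dep])) d) d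
        = its.foldl (fun d q => d.insert q.1 q.2) d
  | [], _, _, _, _ => rfl
  | q :: its, d, hnd, hits, h => by
      have hits' : q.1 ∉ its.map Prod.fst ∧ (its.map Prod.fst).Nodup := by
        simpa [List.nodup_cons] using hits
      have h0 : d.get? q.1 = some [] := h q (by simp)
      have hin : q.2.foldl (fun d dep => d.modify q.1 [] (· ++ [dep])) d = d.insert q.1 q.2 := by
        simpa using pv_inner q.1 q.2 d [] hnd h0
      have hne : ∀ r ∈ its, r.1 ≠ q.1 := by
        intro r hr hEq
        exact hits'.1 (hEq ▸ List.mem_map_of_mem hr)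
      rw [List.foldl_cons, List.foldl_cons, hin]
      exact pv_fill its (d.insert q.1 q.2)
        (PySem.Dict.nodup_keys_insert d q.1 q.2 hnd)
        hits'.2
        (fun r hr => by
          rw [PySem.Dict.get?_insert_of_ne d q.2 (hne r hr)]
          exact h r (by simp [hr]))

-- overwriting the []-initialised dict key by key, in order, yields exactly the items list
theorem pv_overwrite :
    ∀ (its : List (String × List String)) (pre : List (String × List String)),
      ((pre ++ its).map Prod.fst).Nodup →
      its.foldl (fun d q => d.insert q.1 q.2)
          (PySem.Dict.mk (pre ++ its.map (fun q => (q.1, ([] : List String)))))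
        = PySem.Dict.mk (pre ++ its)
  | [], pre, _ => by simp
  | q :: its, pre, hnd => by
      have hnd' : (pre.map Prod.fst ++ q.1 :: its.map Prod.fst).Nodup := by simpa using hnd
      have hdisj := List.disjoint_of_nodup_append hnd'
      have hkpre : ∀ r ∈ pre, r.1 ≠ q.1 := by
        intro r hr hEq
        exact hdisj (List.mem_map_of_mem hr) (by simp [hEq])
      have hkits : ∀ r ∈ its, r.1 ≠ q.1 := by
        intro r hr hEq
        have h2 := (List.nodup_append.mp hnd').2.1
        exact (List.nodup_cons.mp h2).1 (hEq ▸ List.mem_map_of_mem hr)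
      have hc : (PySem.Dict.mk (pre ++ (q.1, ([] : List String)) :: its.map (fun q => (q.1, ([] : List String))))).contains q.1 = true := by
        simp [PySem.Dict.contains]
      have hmap :
          (pre ++ (q.1, ([] : List String)) :: its.map (fun q => (q.1, ([] : List String)))).map
              (fun p => if (p.1 == q.1) = true then (q.1, q.2) else p)
            = pre ++ (q.1, q.2) :: its.map (fun q => (q.1, ([] : List String))) := by
        rw [List.map_append, List.map_cons]
        congr 1
        · exact (List.map_congr_left (fun r hr => by simp [hkpre r hr])).trans (List.map_id pre)
        · congr 1
          · simp
          · rw [List.map_map]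
            exact List.map_congr_left (fun r hr => by simp [hkits r hr])
      have step :
          (PySem.Dict.mk (pre ++ ((q :: its).map (fun q => (q.1, ([] : List String)))))).insert q.1 q.2
            = PySem.Dict.mk ((pre ++ [(q.1, q.2)]) ++ its.map (fun q => (q.1, ([] : List String)))) := by
        apply PySem.Dict.ext
        rw [List.map_cons, PySem.Dict.items_insert_of_contains _ q.2 hc]
        simpa using hmap
      rw [List.foldl_cons, step]
      have hnd2 : (((pre ++ [(q.1, q.2)]) ++ its).map Prod.fst).Nodup := by
        have he : (pre ++ [(q.1, q.2)]) ++ its = pre ++ (q.1, q.2) :: its := by simp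
        rw [he]
        simpa using hnd
      rw [pv_overwrite its (pre ++ [(q.1, q.2)]) hnd2]
      congr 1
      simp

-- items of the []-initialising comprehension {name: [] for name in R}
theorem pv_init_items (R : PySem.Dict String (List (String × List String)))
    (hnd : R.keys.Nodup) :
    (R.keys.foldl (fun d name => d.insert name ([] : List String)) PySem.Dict.empty).items
      = R.keys.map (fun n => (n, ([] : List String))) := by
  simpa using
    PySem.Dict.items_foldl_insert_fresh R.keys (fun a => a) (fun _ => ([] : List String))
      PySem.Dict.empty (fun a _ => PySem.Dict.contains_empty a) (by simpa using hnd)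

-- the []-initialised dict looks up [] at EVERY key
theorem pv_init_getD (ks : List String) (c : String) :
    (PySem.Dict.mk (ks.map (fun n => (n, ([] : List String))))).getD c [] = [] := by
  induction ks with
  | nil => rfl
  | cons k ks ih =>
      rw [List.map_cons, PySem.Dict.getD_eq_get?_getD, PySem.Dict.get?_mk_cons]
      by_cases h : k = c
      · simp [h]
      · rw [if_neg (by simpa using h), ← PySem.Dict.getD_eq_get?_getD]
        exact ih

-- a nested scatter loop is the flat scatter loop over the edge list (dep, name)
theorem pv_flatten :
    ∀ (l : List (String × List String)) (d : PySem.Dict String (List String)),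
      l.foldl (fun d q => q.2.foldl (fun d dep => d.modify dep [] (· ++ [q.1])) d) d
        = (l.flatMap (fun q => q.2.map (fun dep => (dep, q.1)))).foldl
            (fun d p => d.modify p.1 [] (· ++ [p.2])) d
  | [], _ => rfl
  | q :: l, d => by
      rw [List.flatMap_cons, List.foldl_append, List.foldl_map, List.foldl_cons]
      exact pv_flatten l _

-- selecting one target out of the edge list = the per-runnable gather comprehension
theorem pv_gather (k : String) :
    ∀ (l : List (String × List String)),
      ((l.flatMap (fun q => q.2.map (fun dep => (dep, q.1)))).filter
          (fun p => p.1 == k)).map (·.2)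
        = l.flatMap (fun q => (q.2.filter (fun dep => dep == k)).map (fun _ => q.1))
  | [] => rfl
  | q :: l => by
      rw [List.flatMap_cons, List.filter_append, List.map_append, List.filter_map,
        List.map_map, pv_gather k l, List.flatMap_cons]
      simp [Function.comp_def]

theorem topology_eq (runnables : List (String × List (String × List String))) :
    topology runnables = topology_alt runnables := by
  unfold topology topology_alt
  dsimp only
  set R := PySem.Dict.ofList runnables with hR
  have hndR : R.keys.Nodup := PySem.Dict.nodup_keys_ofList runnables
  set its : List (String × List String) := R.items.map (fun p => (p.1, pvDeps R p)) with hits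
  have hfst : its.map Prod.fst = R.keys := by
    rw [hits, List.map_map]; rfl
  have hndits : (its.map Prod.fst).Nodup := by rw [hfst]; exact hndR
  set d0 : PySem.Dict String (List String) :=
    R.keys.foldl (fun d name => d.insert name []) PySem.Dict.empty with hd0
  have hd0items : d0.items = R.keys.map (fun n => (n, ([] : List String))) :=
    pv_init_items R hndR
  have hd0keys : d0.keys.Nodup := by
    simp only [PySem.Dict.keys, hd0items, List.map_map]
    simpa [Function.comp] using hndR
  have hd0get : ∀ q ∈ its, d0.get? q.1 = some [] := by
    intro q hq
    apply PySem.Dict.get?_of_mem_items d0 _ hd0keys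
    rw [hd0items]
    have : q.1 ∈ R.keys := by
      rw [← hfst]; exact List.mem_map_of_mem hq
    exact List.mem_map.mpr ⟨q.1, this, rfl⟩
  have hd0mk : d0 = PySem.Dict.mk (R.keys.map (fun n => (n, ([] : List String)))) := by
    apply PySem.Dict.ext; rw [hd0items]
  -- every collected dependency is a key of R
  have hdep : ∀ q ∈ its, ∀ dep ∈ q.2, dep ∈ R.keys := by
    intro q hq dep hdep
    rw [hits] at hq
    obtain ⟨p, _, rfl⟩ := List.mem_map.mp hq
    have := List.of_mem_filter (p := fun dep => R.contains dep) hdep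
    exact (PySem.Dict.contains_iff_mem_keys R dep).mp this
  -- B's predecessors dict is exactly `Dict.mk its`
  have hpredB :
      R.items.foldl
        (fun d p =>
          d.insert p.1
            ((pyOrEmpty ((PySem.Dict.ofList p.2).getD "deps" [])).filter (fun dep => R.contains dep)))
        PySem.Dict.empty = PySem.Dict.mk its := by
    apply PySem.Dict.ext
    have := PySem.Dict.items_foldl_insert_fresh R.items Prod.fst (fun p => pvDeps R p)
      PySem.Dict.empty (fun a _ => PySem.Dict.contains_empty a.1) hndR
    simpa [pvDeps, pvOrEmpty_filter] using this
  -- A's pair fold, split and normalised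
  rw [pv_split_pairs R R.items d0 d0]
  simp only [pv_stepS, pv_stepP]
  -- A's predecessors dict equals `Dict.mk its` too
  have hApred :
      R.items.foldl
        (fun d p => (pvDeps R p).foldl (fun d dep => d.modify p.1 [] (· ++ [dep])) d) d0
        = PySem.Dict.mk its := by
    have h1 :
        R.items.foldl
          (fun d p => (pvDeps R p).foldl (fun d dep => d.modify p.1 [] (· ++ [dep])) d) d0
          = its.foldl (fun d q => q.2.foldl (fun d dep => d.modify q.1 [] (· ++ [dep])) d) d0 := by
      rw [hits, List.foldl_map]
    have hd0mk' : d0 = PySem.Dict.mk (its.map (fun q => (q.1, ([] : List String)))) := by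
      apply PySem.Dict.ext
      rw [hd0items, hits, List.map_map]
      simp only [PySem.Dict.keys, List.map_map]
      rfl
    rw [h1, pv_fill its d0 hd0keys hndits hd0get, hd0mk']
    have := pv_overwrite its [] (by simpa using hndits)
    simpa using this
  rw [hpredB, hApred]
  -- SUCCESSORS.  A's side: flatten to the edge list
  set sA : PySem.Dict String (List String) :=
    R.items.foldl
      (fun s p => (pvDeps R p).foldl (fun s dep => s.modify dep [] (· ++ [p.1])) s) d0 with hsA
  set edges : List (String × String) :=
    its.flatMap (fun q => q.2.map (fun dep => (dep, q.1))) with hedges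
  have hsA_edges : sA = edges.foldl (fun d p => d.modify p.1 [] (· ++ [p.2])) d0 := by
    rw [hsA, hedges, ← pv_flatten its d0, hits, List.foldl_map]
  have hefst : ∀ e ∈ edges, e.1 ∈ R.keys := by
    intro e he
    rw [hedges] at he
    obtain ⟨q, hq, he2⟩ := List.mem_flatMap.mp he
    obtain ⟨dep, hdep', rfl⟩ := List.mem_map.mp he2
    exact hdep q hq dep hdep'
  -- keys of sA stay exactly R.keys
  have hd0keysEq : d0.keys = R.keys := by
    simp only [PySem.Dict.keys, hd0items, List.map_map]
    rfl
  have hsAkeys : sA.keys = R.keys := by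
    rw [hsA_edges, PySem.Dict.keys_foldl_modify_key edges Prod.fst ([])
      (fun _ e v => v ++ [e.2]) d0, hd0keysEq,
      PySem.Set.update_eq_append_filter]
    have : (PySem.Set.ofList (edges.map Prod.fst)).filter
        (fun y => !(PySem.Set.contains R.keys y)) = [] := by
      rw [List.filter_eq_nil_iff]
      intro a ha
      have : a ∈ edges.map Prod.fst := (PySem.Set.mem_ofList _ _).mp ha
      obtain ⟨e, he, rfl⟩ := List.mem_map.mp this
      simp [hefst e he]
    rw [this, List.append_nil]
  have hsAnodup : sA.keys.Nodup := by rw [hsAkeys]; exact hndR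
  -- value of sA at each key: gather over the edge list
  have hsAgetD : ∀ k, sA.getD k [] = (edges.filter (fun p => p.1 == k)).map (·.2) := by
    intro k
    rw [hsA_edges, PySem.Dict.getD_foldl_modify_append, hd0mk, pv_init_getD]
    simp
  have hsAitems : sA.items
      = R.keys.map (fun k => (k, (edges.filter (fun p => p.1 == k)).map (·.2))) := by
    rw [PySem.Dict.items_eq_map_keys sA hsAnodup [], hsAkeys]
    exact List.map_congr_left (fun k _ => by rw [hsAgetD k])
  -- B's side: a fresh insert per key, values the gather comprehension
  have hsBitems :
      (R.keys.foldl
        (fun d name =>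
          d.insert name
            ((PySem.Dict.mk its).items.flatMap
              (fun q => (q.2.filter (fun dep => dep == name)).map (fun _ => q.1))))
        PySem.Dict.empty).items
      = R.keys.map (fun n =>
          (n, its.flatMap (fun q => (q.2.filter (fun dep => dep == n)).map (fun _ => q.1)))) := by
    have := PySem.Dict.items_foldl_insert_fresh R.keys (fun a => a)
      (fun n => its.flatMap (fun q => (q.2.filter (fun dep => dep == n)).map (fun _ => q.1)))
      PySem.Dict.empty (fun a _ => PySem.Dict.contains_empty a) (by simpa using hndR)
    simpa using this
  rw [hsBitems, hsAitems]
  refine congrArg (fun z => (z, (PySem.Dict.mk its).items)) ?_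
  exact List.map_congr_left (fun k _ => by rw [hedges, pv_gather k its])

-- ===== VERDICT (by name: the statement is the Claim_ definition above) =====
theorem topology_spec : Claim_equal_topology := by
  intro runnables _
  unfold Spec_topology
  exact topology_eq runnables
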